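-- pv_equiv track=rewrite | github.com/PollyOsina/DL_basics | Hometask_PythonBasics_DeepLearningSchool.py | cumsum_and_erase
-- ===== SOURCE A (Python) =====
-- def cumsum_and_erase(A, erase = 1):
--     b=0
--     C=[]
--     for i in A:
--         b += i
--         if b != erase:
--             C.append(b)
--     return C
-- ===== SOURCE B (Python) =====
-- def cumsum_and_erase(A, erase=1):
--     # Right-to-left: start from the total sum and peel elements off the end,
--     # so each prefix sum is recovered by subtraction; output built back-to-front.
--     s = sum(A)
--     out = []
--     for x in reversed(A):
--         if s != erase:
--             out.append(s)
--         s -= x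
--     out.reverse()
--     return out
-- ===== Notes on version B (the rewrite author's own statement) =====
-- stated objective: alternative
-- what changed: B traverses A right-to-left: it computes the total sum once, recovers each prefix sum by subtracting elements from the end, and builds the kept results back-to-front before a final reverse, instead of A's left-to-right running-sum accumulation.
import Mathlib
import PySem

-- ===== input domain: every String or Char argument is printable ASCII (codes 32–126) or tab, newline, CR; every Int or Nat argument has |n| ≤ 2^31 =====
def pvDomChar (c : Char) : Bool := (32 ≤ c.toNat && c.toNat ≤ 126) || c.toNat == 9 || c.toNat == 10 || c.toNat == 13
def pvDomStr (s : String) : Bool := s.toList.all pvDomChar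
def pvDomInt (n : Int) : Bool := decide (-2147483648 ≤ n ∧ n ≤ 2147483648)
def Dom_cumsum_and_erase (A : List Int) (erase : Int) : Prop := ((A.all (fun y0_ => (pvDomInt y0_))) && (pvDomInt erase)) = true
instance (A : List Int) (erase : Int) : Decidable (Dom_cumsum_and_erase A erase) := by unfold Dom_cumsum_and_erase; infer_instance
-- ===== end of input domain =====

-- B replaces A's left-to-right running-sum loop by a right-to-left traversal: total sum once, prefix sums recovered by subtraction from the end, output built back-to-front.

-- ===== PORT A =====
-- fused loop: state (b, C); b += i, append b when b != erase
def cumsum_and_erase (A : List Int) (erase : Int) : List Int :=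
  (A.foldl (fun (s : Int × List Int) i =>
      let b := s.1 + i
      if b ≠ erase then (b, s.2 ++ [b]) else (b, s.2)) (0, [])).2

-- ===== PORT B =====
-- s = sum(A); for x in reversed(A): if s != erase: out.append(s); s -= x; out.reverse()
def cumsum_and_erase_alt (A : List Int) (erase : Int) : List Int :=
  ((A.reverse.foldl (fun (st : Int × List Int) x =>
      ((if st.1 ≠ erase then (st.1, st.2 ++ [st.1]) else st).1 - x,
       (if st.1 ≠ erase then (st.1, st.2 ++ [st.1]) else st).2))
    (A.foldl (· + ·) 0, [])).2).reverse

-- ===== PRECONDITION & SPEC =====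
def Spec_cumsum_and_erase (A : List Int) (erase : Int) (out : List Int) : Prop := out = cumsum_and_erase_alt A erase
instance (A : List Int) (erase : Int) (out : List Int) : Decidable (Spec_cumsum_and_erase A erase out) := by unfold Spec_cumsum_and_erase; infer_instance

-- ===== CLAIM (what is proved, stated in full; the proofs are below) =====
def Claim_equal_cumsum_and_erase : Prop := ∀ (A : List Int) (erase : Int), Dom_cumsum_and_erase A erase → Spec_cumsum_and_erase A erase (cumsum_and_erase A erase)

-- ===== LEMMAS AND PROOFS =====
-- prefix sums starting from accumulator b (common reference for both loop invariants)
def pvAcc (b : Int) : List Int → List Int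
  | [] => []
  | i :: t => (b + i) :: pvAcc (b + i) t

theorem cumsum_A_loop_eq (erase : Int) (A : List Int) :
    ∀ (b : Int) (C : List Int),
      (A.foldl (fun (s : Int × List Int) i =>
        let b := s.1 + i
        if b ≠ erase then (b, s.2 ++ [b]) else (b, s.2)) (b, C)).2
      = C ++ (pvAcc b A).filter (fun s => s ≠ erase) := by
  induction A with
  | nil => intro b C; simp [pvAcc]
  | cons i t ih =>
      intro b C
      simp only [List.foldl]
      by_cases h : b + i = erase
      · rw [if_neg (by simp [h]), ih]
        simp [pvAcc, h]
      · rw [if_pos h, ih]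
        simp [pvAcc, h]

theorem cumsum_B_loop_eq (erase : Int) (A : List Int) :
    ∀ (b : Int) (out : List Int),
      A.reverse.foldl (fun (st : Int × List Int) x =>
          ((if st.1 ≠ erase then (st.1, st.2 ++ [st.1]) else st).1 - x,
           (if st.1 ≠ erase then (st.1, st.2 ++ [st.1]) else st).2))
        (b + A.foldl (· + ·) 0, out)
      = (b, out ++ ((pvAcc b A).filter (fun s => s ≠ erase)).reverse) := by
  induction A with
  | nil => intro b out; simp [pvAcc]
  | cons i t ih =>
      intro b out
      have hsum : b + (i :: t).foldl (· + ·) 0 = (b + i) + t.foldl (· + ·) 0 := by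
        have : ∀ (l : List Int) (c d : Int), l.foldl (· + ·) (c + d) = c + l.foldl (· + ·) d := by
          intro l; induction l with
          | nil => intro c d; rfl
          | cons x xs ihx => intro c d; simp only [List.foldl]; rw [add_assoc, ihx]
        calc b + (i :: t).foldl (· + ·) 0 = b + t.foldl (· + ·) (0 + i) := rfl
          _ = (b + i) + t.foldl (· + ·) 0 := by
              rw [show (0 : Int) + i = i + 0 by ring, this t i 0]; ring
      rw [List.reverse_cons, List.foldl_append, hsum, ih (b + i) out]
      simp only [List.foldl]
      by_cases h : b + i = erase
      · simp [pvAcc, h]; omega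
      · simp [pvAcc, h]

-- ===== VERDICT (by name: the statement is the Claim_ definition above) =====
theorem cumsum_and_erase_spec : Claim_equal_cumsum_and_erase := by
  intro A erase _
  unfold Spec_cumsum_and_erase cumsum_and_erase cumsum_and_erase_alt
  rw [cumsum_A_loop_eq erase A 0 []]
  have := cumsum_B_loop_eq erase A 0 []
  rw [zero_add] at this
  rw [this]
  simp
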